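-- pv_equiv track=rewrite | github.com/ibrahimnasrum/fyp-visual-language-rag-assistant | file_lama/FYP_MY_RetailChain_DataPack/oneclick_my_retailchain_v1.py | detect_sales_dimension
-- ===== SOURCE A (Python) =====
-- def detect_sales_dimension(q: str) -> str:
--     s = q.lower()
--     if any(k in s for k in ["state", "negeri", "region", "kawasan"]):
--         return "State"
--     if any(k in s for k in ["branch", "cawangan", "outlet", "kedai"]):
--         return "Branch"
--     if any(k in s for k in ["channel", "saluran", "delivery", "takeaway", "dine"]):
--         return "Channel"
--     if any(k in s for k in ["employee", "staff", "salesrep", "sales rep", "pekerja"]):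
--         return "Employee"
--     return "Product"
-- ===== SOURCE B (Python) =====
-- # Flat keyword->rank table; one pass keeps the minimum matched rank, then
-- # indexes the label array (rank 4 = no match = "Product").
--
-- KEYWORD_RANKS = [
--     ("state", 0), ("negeri", 0), ("region", 0), ("kawasan", 0),
--     ("branch", 1), ("cawangan", 1), ("outlet", 1), ("kedai", 1),
--     ("channel", 2), ("saluran", 2), ("delivery", 2), ("takeaway", 2), ("dine", 2),
--     ("employee", 3), ("staff", 3), ("salesrep", 3), ("sales rep", 3), ("pekerja", 3),
-- ]
--
-- LABELS = ["State", "Branch", "Channel", "Employee", "Product"]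
--
-- def detect_sales_dimension(q: str) -> str:
--     s = q.lower()
--     best = 4
--     for kw, rank in KEYWORD_RANKS:
--         if rank < best and kw in s:
--             best = rank
--     return LABELS[best]
-- ===== Notes on version B (the rewrite author's own statement) =====
-- stated objective: alternative
-- what changed: Replaced the staged early-return chain of four any() passes by a single pass over a flat keyword->rank table that keeps the minimum matched rank and finally indexes a label array; correct because the first matching group equals the minimal rank among all matched keywords.
import Mathlib
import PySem

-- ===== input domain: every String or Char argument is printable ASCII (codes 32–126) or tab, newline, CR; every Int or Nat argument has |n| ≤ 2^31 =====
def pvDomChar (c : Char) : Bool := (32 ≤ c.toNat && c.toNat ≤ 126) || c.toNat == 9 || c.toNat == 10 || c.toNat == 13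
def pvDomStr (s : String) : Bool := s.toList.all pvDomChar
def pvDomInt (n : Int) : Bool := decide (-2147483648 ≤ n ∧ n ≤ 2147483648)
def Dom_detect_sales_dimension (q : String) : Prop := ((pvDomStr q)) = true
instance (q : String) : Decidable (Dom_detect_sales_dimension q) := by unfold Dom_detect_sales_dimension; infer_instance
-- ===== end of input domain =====

-- B replaces A's staged early-return chain by one pass over a flat keyword->rank
-- table keeping the minimum matched rank, then indexing a label array (alternative; same cost).


-- ===== PORT A =====
def detect_sales_dimension (q : String) : String :=
  let s := PySem.Str.lower q
  if (["state", "negeri", "region", "kawasan"].any fun k => PySem.Str.isIn k s) then "State"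
  else if (["branch", "cawangan", "outlet", "kedai"].any fun k => PySem.Str.isIn k s) then "Branch"
  else if (["channel", "saluran", "delivery", "takeaway", "dine"].any fun k => PySem.Str.isIn k s) then "Channel"
  else if (["employee", "staff", "salesrep", "sales rep", "pekerja"].any fun k => PySem.Str.isIn k s) then "Employee"
  else "Product"

-- ===== PORT B =====
def pvKeywordRanks : List (String × Int) :=
  [("state", 0), ("negeri", 0), ("region", 0), ("kawasan", 0),
   ("branch", 1), ("cawangan", 1), ("outlet", 1), ("kedai", 1),
   ("channel", 2), ("saluran", 2), ("delivery", 2), ("takeaway", 2), ("dine", 2),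
   ("employee", 3), ("staff", 3), ("salesrep", 3), ("sales rep", 3), ("pekerja", 3)]

def pvLabels : List String := ["State", "Branch", "Channel", "Employee", "Product"]

-- the loop body of Source B: keep the minimum matched rank
def pvStep (s : String) (best : Int) (kr : String × Int) : Int :=
  if kr.2 < best ∧ PySem.Str.isIn kr.1 s = true then kr.2 else best

def detect_sales_dimension_alt (q : String) : String :=
  let s := PySem.Str.lower q
  let best := pvKeywordRanks.foldl (pvStep s) 4
  (PySem.List.pyGet? pvLabels best).getD ""   -- LABELS[best]; best ∈ [0,4] so never none

-- ===== PRECONDITION & SPEC =====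
def Spec_detect_sales_dimension (q : String) (out : String) : Prop := out = detect_sales_dimension_alt q
instance (q : String) (out : String) : Decidable (Spec_detect_sales_dimension q out) := by unfold Spec_detect_sales_dimension; infer_instance

-- ===== CLAIM (what is proved, stated in full; the proofs are below) =====
def Claim_equal_detect_sales_dimension : Prop := ∀ (q : String), Dom_detect_sales_dimension q → Spec_detect_sales_dimension q (detect_sales_dimension q)

-- ===== LEMMAS AND PROOFS =====

theorem pvStep_matched (s k : String) (r acc : Int) (h : PySem.Str.isIn k s = true) :
    pvStep s acc (k, r) = min acc r := by
  simp only [pvStep, h, and_true, min_def]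
  split_ifs <;> omega

theorem pvStep_unmatched (s k : String) (r acc : Int) (h : PySem.Str.isIn k s = false) :
    pvStep s acc (k, r) = acc :=
  if_neg (by rintro ⟨-, hh⟩; rw [h] at hh; exact Bool.false_ne_true hh)

-- folding one constant-rank group: the accumulator becomes min acc r iff some keyword matches
theorem pvFold_group (s : String) (r : Int) (ks : List String) (acc : Int) :
    List.foldl (pvStep s) acc (ks.map (fun k => (k, r)))
      = if ks.any (fun k => PySem.Str.isIn k s) then min acc r else acc := by
  induction ks generalizing acc with
  | nil => simp
  | cons k rest ih =>
      simp only [List.map_cons, List.foldl_cons, List.any_cons]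
      by_cases h : PySem.Str.isIn k s = true
      · rw [pvStep_matched s k r acc h, ih]
        by_cases ha : (rest.any fun k => PySem.Str.isIn k s) = true
        · simp only [h, ha, Bool.true_or, ite_true, min_assoc, min_self]
        · simp only [h, Bool.true_or, ite_true, if_neg ha]
      · rw [Bool.not_eq_true] at h
        rw [pvStep_unmatched s k r acc h, ih]
        simp only [h, Bool.false_or]

theorem pvKeywordRanks_groups :
    pvKeywordRanks =
      (["state", "negeri", "region", "kawasan"].map (fun k => (k, (0 : Int))))
      ++ (["branch", "cawangan", "outlet", "kedai"].map (fun k => (k, (1 : Int))))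
      ++ (["channel", "saluran", "delivery", "takeaway", "dine"].map (fun k => (k, (2 : Int))))
      ++ (["employee", "staff", "salesrep", "sales rep", "pekerja"].map (fun k => (k, (3 : Int)))) := rfl

-- ===== VERDICT (by name: the statement is the Claim_ definition above) =====
theorem detect_sales_dimension_spec : Claim_equal_detect_sales_dimension := by
  intro q _
  simp only [Spec_detect_sales_dimension, detect_sales_dimension, detect_sales_dimension_alt]
  rw [pvKeywordRanks_groups]
  simp only [List.foldl_append, pvFold_group]
  cases c0 : (["state", "negeri", "region", "kawasan"].any
      fun k => PySem.Str.isIn k (PySem.Str.lower q)) <;>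
  cases c1 : (["branch", "cawangan", "outlet", "kedai"].any
      fun k => PySem.Str.isIn k (PySem.Str.lower q)) <;>
  cases c2 : (["channel", "saluran", "delivery", "takeaway", "dine"].any
      fun k => PySem.Str.isIn k (PySem.Str.lower q)) <;>
  cases c3 : (["employee", "staff", "salesrep", "sales rep", "pekerja"].any
      fun k => PySem.Str.isIn k (PySem.Str.lower q)) <;>
  decide
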